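-- pv_equiv track=rewrite | github.com/technion-cs-nlp/plms-repeats-circuits | plms_repeats_circuits/utils/visualization_utils.py | downsample_tick_labels
-- ===== SOURCE A (Python) =====
-- from typing import List, Optional, Dict, Tuple, Union
--
-- def downsample_tick_labels(labels: List[str]) -> List[str]:
--     n = len(labels)
--     if n <= 50:
--         step = 1
--     elif n <= 100:
--         step = 2
--     elif n <= 300:
--         step = 5
--     elif n <= 600:
--         step = 10
--     else:
--         step = 20
--
--     return [label if i % step == 0 else "" for i, label in enumerate(labels)]
-- ===== SOURCE B (Python) =====
-- def downsample_tick_labels(labels):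
--     n = len(labels)
--     if n <= 50:
--         step = 1
--     elif n <= 100:
--         step = 2
--     elif n <= 300:
--         step = 5
--     elif n <= 600:
--         step = 10
--     else:
--         step = 20
--     # chunked emission: keep one label, then emit a block of blanks, jump ahead by step
--     out = []
--     i = 0
--     while i < n:
--         out.append(labels[i])
--         out.extend([""] * min(step - 1, n - i - 1))
--         i += step
--     return out
-- ===== Notes on version B (the rewrite author's own statement) =====
-- stated objective: alternative
-- what changed: Replaces the per-element 'i % step' branching comprehension by a chunked while loop that emits each kept label followed by a block of step-1 blanks and jumps ahead by step, so no index ever takes a modulo.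
import Mathlib
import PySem

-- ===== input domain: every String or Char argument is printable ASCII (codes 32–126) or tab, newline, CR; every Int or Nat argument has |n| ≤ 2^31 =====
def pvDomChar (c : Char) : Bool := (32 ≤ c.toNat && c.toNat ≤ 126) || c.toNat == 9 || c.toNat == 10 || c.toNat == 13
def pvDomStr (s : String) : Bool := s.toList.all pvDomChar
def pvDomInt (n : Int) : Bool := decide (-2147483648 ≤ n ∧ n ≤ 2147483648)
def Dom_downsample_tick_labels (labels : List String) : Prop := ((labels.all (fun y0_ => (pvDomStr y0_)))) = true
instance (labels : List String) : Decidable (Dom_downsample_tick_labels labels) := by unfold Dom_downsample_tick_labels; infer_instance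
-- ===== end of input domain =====

-- B emits each kept label followed by a block of step-1 blanks in a chunked loop (no per-element modulo); alternative decomposition, same cost.

-- ===== PORT A =====
def downsample_tick_labels (labels : List String) : List String :=
  let n : Int := labels.length
  let step : Int :=
    if n ≤ 50 then 1
    else if n ≤ 100 then 2
    else if n ≤ 300 then 5
    else if n ≤ 600 then 10
    else 20
  (PySem.List.enumerate labels 0).map (fun p => if PySem.Int.mod p.1 step = 0 then p.2 else "")

-- ===== PORT B =====
-- the chunked while loop: keep head, emit min (step-1) (rest) blanks, jump ahead by step.
-- k stands for step - 1 (step = k + 1 ≥ 1, as in Source B the step is always positive).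
def pvChunk (k : Nat) : List String → List String
  | [] => []
  | x :: xs => x :: (List.replicate (min k xs.length) "" ++ pvChunk k (xs.drop k))
termination_by l => l.length
decreasing_by simp

def downsample_tick_labels_alt (labels : List String) : List String :=
  let n : Int := labels.length
  let step : Nat :=
    if n ≤ 50 then 1
    else if n ≤ 100 then 2
    else if n ≤ 300 then 5
    else if n ≤ 600 then 10
    else 20
  pvChunk (step - 1) labels

-- ===== PRECONDITION & SPEC =====
def Spec_downsample_tick_labels (labels : List String) (out : List String) : Prop := out = downsample_tick_labels_alt labels
instance (labels : List String) (out : List String) : Decidable (Spec_downsample_tick_labels labels out) := by unfold Spec_downsample_tick_labels; infer_instance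

-- ===== CLAIM =====
def Claim_equal_downsample_tick_labels : Prop := ∀ (labels : List String), Dom_downsample_tick_labels labels → Spec_downsample_tick_labels labels (downsample_tick_labels labels)

-- ===== LEMMAS AND PROOFS =====

theorem pvChunk_length (k : Nat) (l : List String) : (pvChunk k l).length = l.length := by
  induction l using pvChunk.induct k with
  | case1 => rw [pvChunk]
  | case2 x xs ih => rw [pvChunk.eq_def]; simp [ih]; omega

theorem pvChunk_get (k : Nat) (l : List String) (j : Nat) (hj : j < l.length) :
    (pvChunk k l)[j]'(by rw [pvChunk_length]; exact hj)
      = if j % (k + 1) = 0 then l[j] else "" := by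
  induction l using pvChunk.induct k generalizing j with
  | case1 => simp at hj
  | case2 x xs ih =>
    have hrw : pvChunk k (x :: xs) = x :: (List.replicate (min k xs.length) "" ++ pvChunk k (xs.drop k)) := by
      rw [pvChunk.eq_def]
    simp only [hrw]
    cases j with
    | zero => simp
    | succ j =>
      rw [List.getElem_cons_succ]
      by_cases hsmall : j < min k xs.length
      · rw [List.getElem_append_left (by simpa using hsmall)]
        have hmj : (j + 1) % (k + 1) = j + 1 := Nat.mod_eq_of_lt (by omega)
        have hne : ¬ (j + 1) % (k + 1) = 0 := by omega
        simp [hne]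
      · have hj1 : j < xs.length := by simpa using hj
        have hk : k ≤ xs.length := by omega
        have hmin : min k xs.length = k := by omega
        have hge : k ≤ j := by omega
        rw [List.getElem_append_right (by simpa [hmin] using hge)]
        have hlt : j - k < (xs.drop k).length := by simp; omega
        have hkey := ih (j - k) hlt
        simp only [List.length_replicate, hmin]
        rw [hkey]
        have hgetd : (xs.drop k)[j - k]'hlt = xs[j]'hj1 := by
          rw [List.getElem_drop]
          congr 1
          omega
        rw [hgetd]
        have hmod : (j - k) % (k + 1) = (j + 1) % (k + 1) := by
          conv_rhs => rw [show j + 1 = (j - k) + (k + 1) by omega]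
          rw [Nat.add_mod_right]
        rw [hmod]
        simp

theorem pv_eq_of_step (labels : List String) (k : Nat) :
    (PySem.List.enumerate labels 0).map
        (fun p => if PySem.Int.mod p.1 ((k : Int) + 1) = 0 then p.2 else "")
      = pvChunk k labels := by
  apply List.ext_getElem
  · simp [pvChunk_length, PySem.List.length_enumerate]
  · intro j hjA hjB
    have hj : j < labels.length := by simpa [PySem.List.length_enumerate] using hjA
    rw [pvChunk_get k labels j hj]
    have hA : ((PySem.List.enumerate labels 0).map
        (fun p => if PySem.Int.mod p.1 ((k : Int) + 1) = 0 then p.2 else ""))[j]'hjA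
        = (if PySem.Int.mod ((0 : Int) + j) ((k : Int) + 1) = 0 then labels[j] else "") := by
      simp [PySem.List.getElem_enumerate]
    rw [hA]
    have hpos : (0 : Int) < (k : Int) + 1 := by positivity
    rw [PySem.Int.mod_eq_emod_of_pos hpos]
    have : ((0 : Int) + j) % ((k : Int) + 1) = ((j % (k + 1) : Nat) : Int) := by
      push_cast; ring_nf
    rw [this]
    by_cases hz : j % (k + 1) = 0
    · simp [hz]
    · rw [if_neg (by exact_mod_cast hz), if_neg hz]

-- ===== VERDICT =====
theorem downsample_tick_labels_spec : Claim_equal_downsample_tick_labels := by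
  intro labels _
  unfold Spec_downsample_tick_labels downsample_tick_labels downsample_tick_labels_alt
  dsimp only
  split_ifs
  · simpa using pv_eq_of_step labels 0
  · simpa using pv_eq_of_step labels 1
  · simpa using pv_eq_of_step labels 4
  · simpa using pv_eq_of_step labels 9
  · simpa using pv_eq_of_step labels 19
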